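-- pv_equiv track=rewrite | github.com/ajeseung/Coding_test_practice | 프로그래머스/1/140108. 문자열 나누기/문자열 나누기.py | solution
-- ===== SOURCE A (Python) =====
-- def solution(s):
--     count = 0
--     i = 0
--
--     while i < len(s):
--         x = s[i]
--         x_count = 0
--         other_count = 0
--
--         for j in range(i, len(s)):
--             if s[j] == x:
--                 x_count += 1
--             else:
--                 other_count += 1
--
--             if x_count == other_count:
--                 break
--
--         count += 1
--         i = j + 1  # 다음 분리 시작 지점으로 이동
--
--     return count
-- ===== SOURCE B (Python) =====
-- def solution(s):
--     ans = x = y = 0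
--     first = ''
--     for c in s:
--         if x == y:
--             first = c
--             ans += 1
--         if c == first:
--             x += 1
--         else:
--             y += 1
--     return ans
-- ===== Notes on version B (the rewrite author's own statement) =====
-- stated objective: simpler
-- what changed: Replaces A's nested loops (outer while restarting an inner balance scan per segment) with one flat pass over the characters maintaining the answer and two never-reset counters that coincide exactly at segment boundaries.
import Mathlib
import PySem

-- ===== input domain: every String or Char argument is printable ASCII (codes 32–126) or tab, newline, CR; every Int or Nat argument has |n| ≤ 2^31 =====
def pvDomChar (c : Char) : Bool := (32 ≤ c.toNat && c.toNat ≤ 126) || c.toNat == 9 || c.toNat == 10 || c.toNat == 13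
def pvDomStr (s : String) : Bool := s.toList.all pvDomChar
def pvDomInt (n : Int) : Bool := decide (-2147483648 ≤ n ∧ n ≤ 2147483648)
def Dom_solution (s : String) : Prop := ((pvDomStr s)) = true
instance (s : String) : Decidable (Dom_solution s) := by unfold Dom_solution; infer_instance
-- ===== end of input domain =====

-- B replaces A's nested loops (outer restart + inner balance scan) by one flat pass with
-- never-reset counters; objective: simpler (same O(n) cost).

-- ===== PORT A =====
-- Inner `for j in range(i, len(s))`: scan incrementing x_count / other_count, break when
-- equal, return the remaining suffix (after break: i = j + 1; after a full scan the
-- remaining suffix is []).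
def aScan (x : Char) (xc oc : Int) : List Char → List Char
  | [] => []
  | c :: t =>
    let xc' := if c = x then xc + 1 else xc
    let oc' := if c = x then oc else oc + 1
    if xc' = oc' then t else aScan x xc' oc' t

theorem aScan_length_le (x : Char) (xc oc : Int) : ∀ l : List Char, (aScan x xc oc l).length ≤ l.length := by
  intro l
  induction l generalizing xc oc with
  | nil => simp [aScan]
  | cons c t ih =>
    simp only [aScan]
    split <;> split
    · simp
    · exact Nat.le_succ_of_le (ih _ _)
    · simp
    · exact Nat.le_succ_of_le (ih _ _)

-- Outer while loop as recursion on the remaining suffix.  The inner loop's first step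
-- (j = i: s[j] = x, so x_count = 1, other_count = 0, never equal) is inlined: the scan
-- continues on the tail with counters 1 and 0.
def solutionGo : List Char → Int
  | [] => 0
  | c :: t => 1 + solutionGo (aScan c 1 0 t)
termination_by l => l.length
decreasing_by exact Nat.lt_succ_of_le (aScan_length_le _ _ _ _)

def solution (s : String) : Int := solutionGo s.toList

-- ===== PORT B =====
-- One step of Source B's flat loop; state (ans, first, x, y).  The Python initial
-- `first = ''` is never consulted (x == y at the first character overwrites it),
-- so the port uses an arbitrary initial character.
def bStep (st : Int × Char × Int × Int) (c : Char) : Int × Char × Int × Int :=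
  let (ans, f, x, y) := st
  let (ans, f) := if x = y then (ans + 1, c) else (ans, f)
  if c = f then (ans, f, x + 1, y) else (ans, f, x, y + 1)

def solution_alt (s : String) : Int := (s.toList.foldl bStep (0, ' ', 0, 0)).1

-- ===== PRECONDITION & SPEC =====
def Spec_solution (s : String) (out : Int) : Prop := out = solution_alt s
instance (s : String) (out : Int) : Decidable (Spec_solution s out) := by unfold Spec_solution; infer_instance

-- ===== CLAIM (what is proved, stated in full; the proofs are below) =====
def Claim_equal_solution : Prop := ∀ (s : String), Dom_solution s → Spec_solution s (solution s)

-- ===== LEMMAS AND PROOFS =====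

-- Folding b's step through a segment with unequal counters (x = k + xc, y = k + oc,
-- xc ≠ oc) equals folding from some balanced state (m, m) over what A's inner scan leaves.
theorem bStep_inner (x : Char) : ∀ (l : List Char) (ans : Int) (xc oc k : Int), xc ≠ oc →
    ∃ m : Int, (List.foldl bStep (ans, x, k + xc, k + oc) l).1
      = (List.foldl bStep (ans, x, m, m) (aScan x xc oc l)).1 := by
  intro l
  induction l with
  | nil => intro ans xc oc k _; exact ⟨0, by simp [aScan]⟩
  | cons c t ih =>
    intro ans xc oc k hne
    have hk : k + xc ≠ k + oc := by omega
    by_cases hc : c = x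
    · subst hc
      by_cases hb : xc + 1 = oc
      · refine ⟨k + oc, ?_⟩
        simp [List.foldl, bStep, hk, aScan, hb]
        have : k + xc + 1 = k + oc := by omega
        rw [this]
      · have := ih ans (xc + 1) oc k hb
        simpa [List.foldl, bStep, hk, aScan, hb, add_assoc] using this
    · by_cases hb : xc = oc + 1
      · refine ⟨k + xc, ?_⟩
        simp [List.foldl, bStep, hc, aScan, hb]
        have h2 : k + oc + 1 = k + (oc + 1) := by ring
        rw [h2]
      · have := ih ans xc (oc + 1) k (by omega)
        have hb' : ¬ (xc = oc + 1) := hb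
        simpa [List.foldl, bStep, hk, hc, aScan, hb', add_assoc] using this

theorem bStep_main : ∀ (n : ℕ) (l : List Char), l.length ≤ n → ∀ (ans : Int) (f : Char) (k : Int),
    (List.foldl bStep (ans, f, k, k) l).1 = ans + solutionGo l := by
  intro n
  induction n with
  | zero =>
    intro l hl ans f k
    have : l = [] := List.eq_nil_of_length_eq_zero (Nat.le_zero.mp hl)
    simp [this, solutionGo]
  | succ n ih =>
    intro l hl ans f k
    match l with
    | [] => simp [solutionGo]
    | c :: t =>
      have h1 : (List.foldl bStep (ans, f, k, k) (c :: t)).1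
          = (List.foldl bStep (ans + 1, c, k + 1, k) t).1 := by
        simp [List.foldl, bStep]
      obtain ⟨m, hm⟩ := bStep_inner c t (ans + 1) 1 0 k (by omega)
      have hlen : (aScan c 1 0 t).length ≤ n := by
        have := aScan_length_le c 1 0 t
        simp at hl; omega
      rw [h1]
      have hm' : (List.foldl bStep (ans + 1, c, k + 1, k) t).1
          = (List.foldl bStep (ans + 1, c, m, m) (aScan c 1 0 t)).1 := by
        have := hm; simpa using this
      rw [hm', ih _ hlen]
      simp [solutionGo]; ring

-- ===== VERDICT (by name: the statement is the Claim_ definition above) =====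
theorem solution_spec : Claim_equal_solution := by
  intro s _
  unfold Spec_solution solution solution_alt
  rw [bStep_main s.toList.length s.toList le_rfl 0 ' ' 0]
  simp
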